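-- pv_equiv track=rewrite | github.com/RafaelMerlim/polygonal-calculate | modelo_math.py | azimute
-- ===== SOURCE A (Python) =====
-- def azimute(ang_ex):
--     n = 1
--     azimutes = [ang_ex[0]]
--
--     while n < len(ang_ex):
--         azq_t = (ang_ex[n] - 180) + azimutes[n-1]
--         if azq_t > 360:
--             azimutes.append(azq_t - 360)
--         elif azq_t <0:
--             azimutes.append(azq_t + 360)
--         else:
--             azimutes.append(azq_t)
--
--         n+=1
--
--     return azimutes
-- ===== SOURCE B (Python) =====
-- from itertools import accumulate
--
-- def azimute(ang_ex):
--     # Stage 1: unwrapped prefix sums of (a - 180); sums[k] + 180 is the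
--     # uncorrected azimuth at step k.
--     sums = list(accumulate(a - 180 for a in ang_ex))
--     # Stage 2: maintain only the net wrap count c; each output is
--     # sums[k] + 180 + 360*c, with c adjusted once per step as in the spec.
--     out = [sums[0] + 180]
--     c = 0
--     for s in sums[1:]:
--         t = s + 180 + 360 * c
--         if t > 360:
--             c -= 1
--         elif t < 0:
--             c += 1
--         out.append(s + 180 + 360 * c)
--     return out
-- ===== Notes on version B (the rewrite author's own statement) =====
-- stated objective: alternative
-- what changed: Instead of carrying the wrapped running azimuth through one loop, B works in two stages: it first builds the unwrapped prefix sums of (angle - 180) via itertools.accumulate, then a second pass maintains only an integer net-wrap counter c and reconstructs each azimuth as sum + 180 + 360*c.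
import Mathlib
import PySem

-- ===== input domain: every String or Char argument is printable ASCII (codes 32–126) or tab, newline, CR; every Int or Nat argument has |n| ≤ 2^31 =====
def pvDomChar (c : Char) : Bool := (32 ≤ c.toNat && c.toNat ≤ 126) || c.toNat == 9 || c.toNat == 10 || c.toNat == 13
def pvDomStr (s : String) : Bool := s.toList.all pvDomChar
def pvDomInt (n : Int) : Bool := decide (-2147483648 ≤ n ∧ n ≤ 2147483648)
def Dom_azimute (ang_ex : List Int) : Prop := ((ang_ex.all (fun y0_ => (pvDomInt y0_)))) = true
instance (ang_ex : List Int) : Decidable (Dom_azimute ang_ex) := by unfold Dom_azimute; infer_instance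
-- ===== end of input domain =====

-- B recomputes the azimuths from unwrapped prefix sums plus a net-wrap counter (two staged
-- passes) instead of A's single loop carrying the wrapped azimuth; objective: alternative.


-- ===== PORT A =====
-- the while loop: n counts up, azimutes grows by one element per step; azimutes[n-1] and
-- ang_ex[n] are read by index (always in range here, so .getD 0 is never the default)
def azimuteLoop (ang_ex : List Int) (n : Nat) (azimutes : List Int) : List Int :=
  if _h : n < ang_ex.length then
    let azq_t : Int := ((PySem.List.pyGet? ang_ex (n : Int)).getD 0 - 180) +
                       (PySem.List.pyGet? azimutes ((n : Int) - 1)).getD 0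
    azimuteLoop ang_ex (n + 1)
      (azimutes ++ [if azq_t > 360 then azq_t - 360
                    else if azq_t < 0 then azq_t + 360 else azq_t])
  else azimutes
termination_by ang_ex.length - n

def azimute (ang_ex : List Int) : List Int :=
  match ang_ex with
  | [] => []          -- Python raises IndexError on ang_ex[0]; excluded by Pre_azimute
  | a0 :: _ => azimuteLoop ang_ex 1 [a0]

-- ===== PORT B =====
-- stage 1: itertools.accumulate of (a - 180 for a in ang_ex)
def accSums (ang_ex : List Int) : List Int :=
  match ang_ex with
  | [] => []
  | x :: xs => List.scanl (fun s a => s + (a - 180)) (x - 180) xs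

-- stage 2: the for-loop over sums[1:] with wrap counter c and output accumulator out
def wrapLoop (c : Int) (out : List Int) : List Int → List Int
  | [] => out
  | s :: rest =>
    let t := s + 180 + 360 * c
    let c' := if t > 360 then c - 1 else if t < 0 then c + 1 else c
    wrapLoop c' (out ++ [s + 180 + 360 * c']) rest

def azimute_alt (ang_ex : List Int) : List Int :=
  match accSums ang_ex with
  | [] => []          -- Python raises IndexError on sums[0]; excluded by Pre_azimute
  | s0 :: rest => wrapLoop 0 [s0 + 180] rest

-- ===== PRECONDITION & SPEC =====
-- A raises IndexError on the empty list (ang_ex[0]); everywhere else it returns.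
def Pre_azimute (ang_ex : List Int) : Prop := ang_ex ≠ []
instance (ang_ex : List Int) : Decidable (Pre_azimute ang_ex) := by unfold Pre_azimute; infer_instance
def pvWitness_azimute : List Int := [100, 120, 250]

def Spec_azimute (ang_ex : List Int) (out : List Int) : Prop := out = azimute_alt ang_ex
instance (ang_ex : List Int) (out : List Int) : Decidable (Spec_azimute ang_ex out) := by unfold Spec_azimute; infer_instance

-- ===== CLAIM (what is proved, stated in full; the proofs are below) =====
def Claim_equal_azimute : Prop := ∀ (ang_ex : List Int), Dom_azimute ang_ex → Pre_azimute ang_ex → Spec_azimute ang_ex (azimute ang_ex)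

-- ===== LEMMAS AND PROOFS =====

-- common reference: the azimuth sequence after the seed, stepping by the wrapped rule
def azStep (acc x : Int) : Int :=
  let t := acc + x - 180
  if t > 360 then t - 360 else if t < 0 then t + 360 else t

def tailSpec (acc : Int) : List Int → List Int
  | [] => []
  | x :: xs => azStep acc x :: tailSpec (azStep acc x) xs

-- the tail of the scanl producing the prefix sums
def sumsTail (s : Int) : List Int → List Int
  | [] => []
  | y :: ys => (s + (y - 180)) :: sumsTail (s + (y - 180)) ys

theorem scanl_eq_sumsTail (s : Int) (ys : List Int) :
    List.scanl (fun s a => s + (a - 180)) s ys = s :: sumsTail s ys := by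
  induction ys generalizing s with
  | nil => simp [List.scanl, sumsTail]
  | cons y ys ih => rw [List.scanl_cons, sumsTail, ih]

-- A-side: the while loop appends tailSpec of the last output
theorem azimuteLoop_eq (ang_ex : List Int) (k : Nat) :
    ∀ (n : Nat) (azs : List Int) (L : Int),
      k = ang_ex.length - n → 1 ≤ n → azs.length = n → azs.getLast? = some L →
      azimuteLoop ang_ex n azs = azs ++ tailSpec L (ang_ex.drop n) := by
  induction k with
  | zero =>
    intro n azs L hk _ _ _
    have hge : ang_ex.length ≤ n := by omega
    rw [azimuteLoop]
    simp [Nat.not_lt.mpr hge, List.drop_eq_nil_of_le hge, tailSpec]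
  | succ k ih =>
    intro n azs L hk hn hlen hlast
    have hlt : n < ang_ex.length := by omega
    rw [azimuteLoop]
    simp only [hlt, dif_pos]
    have hx : ang_ex[n]? = some ang_ex[n] := List.getElem?_eq_getElem hlt
    have hdrop : ang_ex.drop n = ang_ex[n] :: ang_ex.drop (n + 1) :=
      (List.getElem_cons_drop hlt).symm
    have hgetx : (PySem.List.pyGet? ang_ex (n : Int)).getD 0 = ang_ex[n] := by
      rw [PySem.List.pyGet?_natCast, hx]; rfl
    have hprev : (PySem.List.pyGet? azs ((n : Int) - 1)).getD 0 = L := by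
      have h1 : ((n : Int) - 1) = ((n - 1 : Nat) : Int) := by omega
      rw [h1, PySem.List.pyGet?_natCast]
      have : azs[n-1]? = azs.getLast? := by
        rw [List.getLast?_eq_getElem?, hlen]
      rw [this, hlast]; rfl
    have hnewlast : (azs ++ [azStep L ang_ex[n]]).getLast? = some (azStep L ang_ex[n]) := by
      simp
    have hrec := ih (n + 1) (azs ++ [azStep L ang_ex[n]]) (azStep L ang_ex[n])
      (by omega) (by omega) (by simp [hlen]) hnewlast
    have hstep : (if (ang_ex[n] - 180) + L > 360 then (ang_ex[n] - 180) + L - 360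
                  else if (ang_ex[n] - 180) + L < 0 then (ang_ex[n] - 180) + L + 360
                  else (ang_ex[n] - 180) + L) = azStep L ang_ex[n] := by
      simp only [azStep]
      have : L + ang_ex[n] - 180 = (ang_ex[n] - 180) + L := by ring
      rw [this]
    rw [hgetx, hprev, hstep, hrec, hdrop]
    simp [tailSpec]

-- B-side: the wrap-counter loop over sumsTail appends tailSpec of the last output,
-- given the invariant L = s + 180 + 360*c linking last output, prefix sum and counter
theorem wrapLoop_eq (ys : List Int) :
    ∀ (c : Int) (out : List Int) (s L : Int), L = s + 180 + 360 * c →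
      wrapLoop c out (sumsTail s ys) = out ++ tailSpec L ys := by
  induction ys with
  | nil => intro c out s L _; simp [sumsTail, wrapLoop, tailSpec]
  | cons y ys ih =>
    intro c out s L hL
    rw [sumsTail, wrapLoop]
    have hstep : (s + (y - 180)) + 180 + 360 *
        (if (s + (y - 180)) + 180 + 360 * c > 360 then c - 1
         else if (s + (y - 180)) + 180 + 360 * c < 0 then c + 1 else c) = azStep L y := by
      simp only [azStep]
      have ht : (s + (y - 180)) + 180 + 360 * c = L + y - 180 := by omega
      rw [ht]
      split_ifs with h1 h2 <;> omega
    have hrec := ih (if (s + (y - 180)) + 180 + 360 * c > 360 then c - 1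
                     else if (s + (y - 180)) + 180 + 360 * c < 0 then c + 1 else c)
      (out ++ [azStep L y]) (s + (y - 180)) (azStep L y) hstep.symm
    simp only [hstep, hrec, tailSpec]
    simp

-- ===== VERDICT (by name: the statement is the Claim_ definition above) =====
theorem azimute_spec : Claim_equal_azimute := by
  intro ang_ex _ hpre
  unfold Spec_azimute
  match ang_ex with
  | [] => exact absurd rfl hpre
  | a0 :: rest =>
    show azimute (a0 :: rest) = azimute_alt (a0 :: rest)
    simp only [azimute, azimute_alt, accSums, scanl_eq_sumsTail]
    rw [azimuteLoop_eq (a0 :: rest) ((a0 :: rest).length - 1) 1 [a0] a0 rfl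
        (by omega) rfl rfl,
        wrapLoop_eq rest 0 [(a0 - 180) + 180] (a0 - 180) a0 (by ring)]
    norm_num
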